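-- pv_equiv track=rewrite | github.com/yunica/landsat2geojson | landsat2geojson/feature_utils.py | group_by_path_row
-- ===== SOURCE A (Python) =====
-- def group_by_path_row(scenes: list):
--     """
--     The group_by_path_row function takes a list of scenes and returns a dictionary where the keys are path/row values
--     and the values are lists of scenes with that path/row value.
--
--     Args:
--         scenes (list): list of scenes.
--     Returns:
--          dict : A dictionary with keys that are the path and row of each scene.
--     """
--     group_scenes = {}
--     for scene in scenes:
--         fake_key = f"{scene.get('wrs_path')}__{scene.get('wrs_row')}"
--         if fake_key not in group_scenes.keys():
--             group_scenes[fake_key] = []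
--         group_scenes[fake_key].append(scene)
--     return group_scenes
-- ===== SOURCE B (Python) =====
-- def group_by_path_row(scenes: list):
--     """Group scenes by their wrs_path/wrs_row composite key."""
--     keys = []
--     for scene in scenes:
--         key = f"{scene.get('wrs_path')}__{scene.get('wrs_row')}"
--         if key not in keys:
--             keys.append(key)
--     return {
--         k: [s for s in scenes if f"{s.get('wrs_path')}__{s.get('wrs_row')}" == k]
--         for k in keys
--     }
-- ===== Notes on version B (the rewrite author's own statement) =====
-- stated objective: alternative
-- what changed: B replaces A's single pass that mutates per-key buckets in a dict with a two-phase decomposition: first collect the distinct composite keys in first-occurrence order, then build the dict by filtering the scene list once per key.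
import Mathlib
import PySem

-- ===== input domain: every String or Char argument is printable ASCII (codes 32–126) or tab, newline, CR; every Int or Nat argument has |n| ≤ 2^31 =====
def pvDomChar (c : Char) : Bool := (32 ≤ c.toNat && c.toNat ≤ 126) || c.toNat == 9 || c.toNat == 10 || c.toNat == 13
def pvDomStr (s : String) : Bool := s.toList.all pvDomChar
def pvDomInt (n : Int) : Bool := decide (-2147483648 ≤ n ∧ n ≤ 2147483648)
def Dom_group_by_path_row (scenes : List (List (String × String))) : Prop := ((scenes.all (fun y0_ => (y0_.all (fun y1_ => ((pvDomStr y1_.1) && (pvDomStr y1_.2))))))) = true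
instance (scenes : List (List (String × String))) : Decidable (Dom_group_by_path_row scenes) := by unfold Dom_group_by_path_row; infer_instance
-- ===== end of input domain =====

-- B groups by collecting the distinct composite keys first and then filtering the scene list
-- once per key, instead of A's single pass that mutates per-key buckets inside a dict (objective: alternative).

-- shared helper: the composite key f"{scene.get('wrs_path')}__{scene.get('wrs_row')}"
-- (both Pythons compute this same f-string; .get returns None when missing, printed as "None")
def pvKey (scene : List (String × String)) : String :=
  (((PySem.Dict.mk scene).get? "wrs_path").getD "None") ++ "__" ++
    (((PySem.Dict.mk scene).get? "wrs_row").getD "None")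

-- ===== PORT A =====
def group_by_path_row (scenes : List (List (String × String))) : List (String × List (List (String × String))) :=
  (scenes.foldl
    (fun group_scenes scene =>
      let fake_key := pvKey scene
      let group_scenes :=
        if group_scenes.contains fake_key then group_scenes
        else group_scenes.insert fake_key []
      group_scenes.modify fake_key [] (fun l => l ++ [scene]))
    PySem.Dict.empty).items

-- ===== PORT B =====
def group_by_path_row_alt (scenes : List (List (String × String))) : List (String × List (List (String × String))) :=
  let keys := scenes.foldl
    (fun keys scene =>
      let key := pvKey scene
      if key ∈ keys then keys else keys ++ [key]) []
  keys.map (fun k => (k, scenes.filter (fun s => pvKey s == k)))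

-- ===== PRECONDITION & SPEC =====
def Spec_group_by_path_row (scenes : List (List (String × String))) (out : List (String × List (List (String × String)))) : Prop := out = group_by_path_row_alt scenes
instance (scenes : List (List (String × String))) (out : List (String × List (List (String × String)))) : Decidable (Spec_group_by_path_row scenes out) := by unfold Spec_group_by_path_row; infer_instance

-- ===== CLAIM (what is proved, stated in full; the proofs are below) =====
def Claim_equal_group_by_path_row : Prop := ∀ (scenes : List (List (String × String))), Dom_group_by_path_row scenes → Spec_group_by_path_row scenes (group_by_path_row scenes)

-- ===== LEMMAS AND PROOFS =====

-- the pairs (key, scene), over which A's loop is a plain grouping fold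
def pvPairs (scenes : List (List (String × String))) : List (String × List (String × String)) :=
  scenes.map (fun s => (pvKey s, s))

def pvDict (scenes : List (List (String × String))) : PySem.Dict String (List (List (String × String))) :=
  (pvPairs scenes).foldl (fun d p => d.modify p.1 [] (fun l => l ++ [p.2])) PySem.Dict.empty

-- conditional insert of [] before a modify of the same key is redundant
theorem pv_modify_insert_fresh {α : Type} (g : PySem.Dict String (List α)) (k : String)
    (s : α) (h : g.contains k = false) :
    (g.insert k []).modify k [] (· ++ [s]) = g.modify k [] (· ++ [s]) := by
  obtain ⟨items⟩ := g
  simp only [PySem.Dict.contains] at h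
  simp [PySem.Dict.modify, PySem.Dict.insert, PySem.Dict.contains, h]
  induction items with
  | nil => simp [PySem.Dict.getD, PySem.Dict.get?]
  | cons p t ih =>
    simp_all [PySem.Dict.getD, PySem.Dict.get?]
    exact ih h.2

theorem pv_stepA_eq (g : PySem.Dict String (List (List (String × String))))
    (scene : List (String × String)) :
    (if g.contains (pvKey scene) then g else g.insert (pvKey scene) []).modify
        (pvKey scene) [] (fun l => l ++ [scene])
      = g.modify (pvKey scene) [] (fun l => l ++ [scene]) := by
  cases h : g.contains (pvKey scene) with
  | true => simp
  | false => simpa using pv_modify_insert_fresh g (pvKey scene) scene h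

theorem pv_portA_eq_dict (scenes : List (List (String × String))) :
    group_by_path_row scenes = (pvDict scenes).items := by
  unfold group_by_path_row pvDict pvPairs
  rw [List.foldl_map]
  congr 1
  apply PySem.List.foldl_congr_mem
  intro g s _
  exact pv_stepA_eq g s

theorem pv_nodup_keys (scenes : List (List (String × String))) : (pvDict scenes).keys.Nodup := by
  unfold pvDict
  exact PySem.Dict.nodup_keys_foldl_modify_key _ Prod.fst [] _ _ PySem.Dict.nodup_keys_empty

theorem pv_keys_eq (scenes : List (List (String × String))) :
    (pvDict scenes).keys = PySem.Set.update [] (scenes.map pvKey) := by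
  unfold pvDict pvPairs
  rw [PySem.Dict.keys_foldl_modify_key]
  rw [PySem.Dict.keys_empty, List.map_map]
  rfl

theorem pv_getD_eq (scenes : List (List (String × String))) (k : String) :
    (pvDict scenes).getD k [] = scenes.filter (fun s => pvKey s == k) := by
  unfold pvDict pvPairs
  rw [PySem.Dict.getD_foldl_modify_append]
  simp only [PySem.Dict.getD_empty, List.filter_map, List.nil_append, List.map_map]
  show List.map (fun s => s) (List.filter (fun s => pvKey s == k) scenes) = _
  simp

theorem pv_keysB_eq (scenes : List (List (String × String))) :
    scenes.foldl (fun keys scene =>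
        let key := pvKey scene
        if key ∈ keys then keys else keys ++ [key]) []
      = PySem.Set.update [] (scenes.map pvKey) := by
  show _ = (scenes.map pvKey).foldl PySem.Set.add []
  rw [List.foldl_map]
  apply PySem.List.foldl_congr_mem
  intro ks s _
  simp [PySem.Set.add, PySem.Set.contains]

-- ===== VERDICT (by name: the statement is the Claim_ definition above) =====
theorem group_by_path_row_spec : Claim_equal_group_by_path_row := by
  intro scenes _
  unfold Spec_group_by_path_row group_by_path_row_alt
  rw [pv_portA_eq_dict, pv_keysB_eq,
    PySem.Dict.items_eq_map_keys (pvDict scenes) (pv_nodup_keys scenes) [],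
    pv_keys_eq]
  exact List.map_congr_left (fun k _ => by rw [pv_getD_eq])
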